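-- pv_equiv track=rewrite | github.com/clawdia108/Clawdia | scripts/_archive/task_escalation.py | check_idle_agents
-- ===== SOURCE A (Python) =====
-- def check_idle_agents(execution_state, tasks):
--     alerts = []
--     task_owners = {t.get("owner") for t in tasks if t.get("status") in ("todo", "in_progress")}
--     agents_with_tasks = set()
--     for task in tasks:
--         if task.get("status") in ("todo", "in_progress", "needs_review"):
--             agents_with_tasks.add(task.get("owner"))
--
--     idle_agents = {"strateg", "kontrolor", "planovac", "postak", "udrzbar", "archivar"} - agents_with_tasks
--     for agent in idle_agents:
--         alerts.append({
--             "type": "idle_agent",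
--             "severity": "info",
--             "agent": agent,
--             "message": f"Agent '{agent}' has no active tasks — consider assigning work",
--         })
--     return alerts
-- ===== SOURCE B (Python) =====
-- def check_idle_agents(execution_state, tasks):
--     active = ("todo", "in_progress", "needs_review")
--     idle = {a for a in {"strateg", "kontrolor", "planovac", "postak", "udrzbar", "archivar"}
--             if not any(t.get("status") in active and t.get("owner") == a for t in tasks)}
--     return [{
--         "type": "idle_agent",
--         "severity": "info",
--         "agent": agent,
--         "message": f"Agent '{agent}' has no active tasks — consider assigning work",
--     } for agent in idle]
-- ===== Notes on version B (the rewrite author's own statement) =====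
-- stated objective: simpler
-- what changed: Drops the dead task_owners set and the accumulated agents_with_tasks set with its set-difference; instead each of the six fixed agents is kept directly by a per-agent any-scan over tasks, and the alert list is a single comprehension.
import Mathlib
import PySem

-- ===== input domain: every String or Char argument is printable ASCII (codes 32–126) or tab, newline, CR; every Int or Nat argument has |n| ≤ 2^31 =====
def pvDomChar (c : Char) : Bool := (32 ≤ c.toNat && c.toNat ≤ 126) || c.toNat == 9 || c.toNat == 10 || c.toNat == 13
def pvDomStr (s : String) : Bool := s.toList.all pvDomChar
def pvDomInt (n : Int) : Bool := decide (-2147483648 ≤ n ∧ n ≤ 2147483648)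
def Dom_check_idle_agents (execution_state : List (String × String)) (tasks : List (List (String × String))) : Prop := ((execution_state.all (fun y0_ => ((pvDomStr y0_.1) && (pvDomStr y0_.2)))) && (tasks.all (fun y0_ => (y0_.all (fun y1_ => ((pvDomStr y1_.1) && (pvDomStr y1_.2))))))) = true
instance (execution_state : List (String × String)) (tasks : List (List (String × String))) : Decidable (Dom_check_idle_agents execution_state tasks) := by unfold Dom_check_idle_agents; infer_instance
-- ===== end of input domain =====

-- ===== PORT A =====
-- B replaces A's accumulated owner-set and set-difference by a per-agent any-scan (objective: simpler).

-- t.get(k) on a dict (association list, unique keys)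
def pvGet (t : List (String × String)) (k : String) : Option String :=
  PySem.Dict.get? (PySem.Dict.mk t) k

-- the fixed six-agent set literal, in source order
def pvAgents : List String := ["strateg", "kontrolor", "planovac", "postak", "udrzbar", "archivar"]

-- the alert dict built for one idle agent
def pvAlert (agent : String) : List (String × String) :=
  [("type", "idle_agent"), ("severity", "info"), ("agent", agent),
   ("message", "Agent '" ++ agent ++ "' has no active tasks — consider assigning work")]

def check_idle_agents (execution_state : List (String × String)) (tasks : List (List (String × String))) : List (List (String × String)) :=
  let alerts : List (List (String × String)) := []
  let _task_owners : PySem.Set (Option String) :=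
    PySem.Set.ofList ((tasks.filter (fun t =>
      pvGet t "status" == some "todo" || pvGet t "status" == some "in_progress")).map (fun t => pvGet t "owner"))
  let agents_with_tasks : PySem.Set (Option String) :=
    tasks.foldl (fun s t =>
      if pvGet t "status" == some "todo" || pvGet t "status" == some "in_progress" ||
         pvGet t "status" == some "needs_review"
      then s.add (pvGet t "owner") else s) PySem.Set.empty
  let idle_agents : PySem.Set (Option String) :=
    PySem.Set.diff (PySem.Set.ofList (pvAgents.map some)) agents_with_tasks
  -- every element of idle_agents is `some a` for one of the six names, so `.getD ""` only unwraps
  idle_agents.foldl (fun alerts ag => alerts ++ [pvAlert (ag.getD "")]) alerts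

-- ===== PORT B =====
def check_idle_agents_alt (execution_state : List (String × String)) (tasks : List (List (String × String))) : List (List (String × String)) :=
  let active : List String := ["todo", "in_progress", "needs_review"]
  let idle : PySem.Set String :=
    PySem.Set.ofList ((PySem.Set.ofList pvAgents).filter (fun a =>
      ! tasks.any (fun t =>
        (match pvGet t "status" with
         | some s => active.contains s
         | none => false) && pvGet t "owner" == some a)))
  idle.map pvAlert

-- ===== PRECONDITION & SPEC =====
def Spec_check_idle_agents (execution_state : List (String × String)) (tasks : List (List (String × String))) (out : List (List (String × String))) : Prop := out = check_idle_agents_alt execution_state tasks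
instance (execution_state : List (String × String)) (tasks : List (List (String × String))) (out : List (List (String × String))) : Decidable (Spec_check_idle_agents execution_state tasks out) := by unfold Spec_check_idle_agents; infer_instance

-- ===== CLAIM (what is proved, stated in full; the proofs are below) =====
def Claim_equal_check_idle_agents : Prop := ∀ (execution_state : List (String × String)) (tasks : List (List (String × String))), Dom_check_idle_agents execution_state tasks → Spec_check_idle_agents execution_state tasks (check_idle_agents execution_state tasks)

-- ===== LEMMAS AND PROOFS =====

-- A's status test equals B's membership test, task by task
theorem pvStatus_eq (t : List (String × String)) :
    (pvGet t "status" == some "todo" || pvGet t "status" == some "in_progress" ||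
     pvGet t "status" == some "needs_review")
    = (match pvGet t "status" with
       | some s => (["todo", "in_progress", "needs_review"] : List String).contains s
       | none => false) := by
  cases h : pvGet t "status" with
  | none => simp
  | some s => simp [List.contains_eq_mem, List.mem_cons, Bool.or_assoc, beq_eq_decide]

-- membership in A's agents_with_tasks fold = B's any-scan
theorem pvContains_fold (tasks : List (List (String × String))) (s : PySem.Set (Option String)) (x : Option String) :
    (tasks.foldl (fun s t =>
      if pvGet t "status" == some "todo" || pvGet t "status" == some "in_progress" ||
         pvGet t "status" == some "needs_review"
      then s.add (pvGet t "owner") else s) s).contains x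
    = (s.contains x || tasks.any (fun t =>
        (pvGet t "status" == some "todo" || pvGet t "status" == some "in_progress" ||
         pvGet t "status" == some "needs_review") && pvGet t "owner" == x)) := by
  induction tasks generalizing s with
  | nil => simp
  | cons t ts ih =>
    simp only [List.foldl_cons, List.any_cons]
    by_cases h : (pvGet t "status" == some "todo" || pvGet t "status" == some "in_progress" ||
         pvGet t "status" == some "needs_review") = true
    · rw [if_pos h, ih, h]
      have hadd : ((s.add (pvGet t "owner")).contains x) = (s.contains x || pvGet t "owner" == x) := by
        simp only [PySem.Set.add, PySem.Set.contains]
        split_ifs with hc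
        · cases hbe : (pvGet t "owner" == x)
          · simp
          · rw [← eq_of_beq hbe]
            simpa using hc
        · simp [beq_eq_decide, eq_comm]
      rw [hadd]
      cases s.contains x <;> cases (pvGet t "owner" == x) <;> simp
    · rw [if_neg h, ih]
      simp only [Bool.not_eq_true] at h
      rw [h]
      simp

theorem check_idle_agents_eq (execution_state : List (String × String)) (tasks : List (List (String × String))) :
    check_idle_agents execution_state tasks = check_idle_agents_alt execution_state tasks := by
  unfold check_idle_agents check_idle_agents_alt
  simp only []
  rw [PySem.List.foldl_append_singleton_eq_map]
  rw [PySem.Set.ofList_eq_self_of_nodup pvAgents (by decide)]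
  rw [PySem.Set.ofList_eq_self_of_nodup (pvAgents.map some) (by decide)]
  rw [PySem.Set.ofList_eq_self_of_nodup _ ((by decide : pvAgents.Nodup).filter _)]
  simp only [PySem.Set.diff, List.filter_map, List.map_map, List.nil_append,
    Function.comp_def, Option.getD_some]
  congr 1
  apply List.filter_congr
  intro a _
  rw [pvContains_fold tasks PySem.Set.empty (some a)]
  simp only [PySem.Set.empty, PySem.Set.contains, List.contains_nil, Bool.false_or]
  simp only [pvStatus_eq]  -- pointwise equality of the two status tests

-- ===== VERDICT (by name: the statement is the Claim_ definition above) =====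
theorem check_idle_agents_spec : Claim_equal_check_idle_agents := by
  intro execution_state tasks _
  unfold Spec_check_idle_agents
  exact check_idle_agents_eq execution_state tasks
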